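-- pv_equiv track=rewrite | github.com/omerlefaruk/CasareRPA | src/casare_rpa/presentation/canvas/graph/category_utils.py | get_all_parent_paths
-- ===== SOURCE A (Python) =====
-- from dataclasses import dataclass, field
-- from typing import Dict, List, Optional, Tuple
--
-- @dataclass(frozen=True)
-- class CategoryPath:
--     """
--     Immutable representation of a hierarchical category path.
--
--     Examples:
--         CategoryPath.parse("google/gmail/send")
--         -> CategoryPath(parts=["google", "gmail", "send"])
--
--         CategoryPath.parse("basic")
--         -> CategoryPath(parts=["basic"])
--     """
--
--     parts: Tuple[str, ...] = field(default_factory=tuple)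
--
--     @classmethod
--     def parse(cls, path: str) -> "CategoryPath":
--         """Parse a category path string into parts."""
--         if not path:
--             return cls(parts=())
--         parts = tuple(p.strip() for p in path.split("/") if p.strip())
--         return cls(parts=parts)
--
--     @property
--     def depth(self) -> int:
--         """Get the nesting depth (1 = top-level)."""
--         return len(self.parts)
--
--     @property
--     def root(self) -> str:
--         """Get the root (top-level) category."""
--         return self.parts[0] if self.parts else ""
--
--     @property
--     def leaf(self) -> str:
--         """Get the leaf (deepest) category."""
--         return self.parts[-1] if self.parts else ""
--
--     @property
--     def parent(self) -> Optional["CategoryPath"]: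
--         """Get parent path, or None if root."""
--         if len(self.parts) <= 1:
--             return None
--         return CategoryPath(parts=self.parts[:-1])
--
--     @property
--     def parent_path(self) -> str:
--         """Get parent as string path."""
--         parent = self.parent
--         return str(parent) if parent else ""
--
--     def is_ancestor_of(self, other: "CategoryPath") -> bool:
--         """Check if this path is an ancestor of another."""
--         if len(self.parts) >= len(other.parts):
--             return False
--         return other.parts[: len(self.parts)] == self.parts
--
--     def is_descendant_of(self, other: "CategoryPath") -> bool:
--         """Check if this path is a descendant of another."""
--         return other.is_ancestor_of(self)
--
--     def __str__(self) -> str: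
--         """Convert back to path string."""
--         return "/".join(self.parts)
--
--     def __bool__(self) -> bool:
--         """Check if path is non-empty."""
--         return bool(self.parts)
--
-- def get_all_parent_paths(category_path: str) -> List[str]:
--     """
--     Get all parent paths for a category.
--
--     Args:
--         category_path: Full category path (e.g., "google/gmail/send")
--
--     Returns:
--         List of parent paths ["google", "google/gmail"]
--     """
--     parsed = CategoryPath.parse(category_path)
--     if not parsed or parsed.depth <= 1:
--         return []
--
--     parents = []
--     path_so_far = []
--     for part in parsed.parts[:-1]:  # Exclude leaf
--         path_so_far.append(part)
--         parents.append("/".join(path_so_far))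
--
--     return parents
-- ===== SOURCE B (Python) =====
-- def get_all_parent_paths(category_path: str):
--     # Normalize once to the canonical "/"-joined path, then every parent path is
--     # exactly the prefix of that string ending just before a "/" character:
--     # segments contain no "/", so the separators mark the ancestor boundaries.
--     full = "/".join(p.strip() for p in category_path.split("/") if p.strip())
--     return [full[:i] for i, c in enumerate(full) if c == "/"]
-- ===== Notes on version B (the rewrite author's own statement) =====
-- stated objective: alternative
-- what changed: B drops A's part-by-part accumulation entirely: it joins the cleaned segments once into the canonical full path and then emits a prefix slice at each '/' character of that string, so ancestors come from a single character scan with slicing instead of an accumulator pair rebuilt and re-joined per segment.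
import Mathlib
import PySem

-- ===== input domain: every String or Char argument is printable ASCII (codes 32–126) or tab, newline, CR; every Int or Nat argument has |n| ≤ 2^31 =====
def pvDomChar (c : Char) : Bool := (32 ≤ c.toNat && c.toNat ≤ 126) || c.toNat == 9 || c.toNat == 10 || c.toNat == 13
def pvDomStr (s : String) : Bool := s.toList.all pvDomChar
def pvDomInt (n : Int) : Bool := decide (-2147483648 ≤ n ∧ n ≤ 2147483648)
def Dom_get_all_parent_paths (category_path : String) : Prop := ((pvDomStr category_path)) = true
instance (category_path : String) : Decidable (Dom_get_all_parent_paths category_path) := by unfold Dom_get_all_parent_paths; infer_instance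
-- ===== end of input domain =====

-- B joins the cleaned segments once into the canonical full path and emits a prefix slice at
-- each '/' character of that string, instead of A's per-segment accumulator loop that rebuilds
-- and re-joins the path-so-far at every step (objective: alternative).

-- ===== PORT A =====
-- CategoryPath.parse: '' -> [], else strip each '/'-segment and keep the non-empty ones.
-- split? with the non-empty literal separator "/" is always `some`, so `.getD []` is exact.
def pvParseParts (category_path : String) : List String :=
  if category_path = "" then []
  else (((PySem.Str.split? category_path "/").getD []).filter
          (fun p => PySem.Str.strip p ≠ "")).map PySem.Str.strip

def get_all_parent_paths (category_path : String) : List String :=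
  let parts := pvParseParts category_path
  if parts = [] ∨ (parts.length : Int) ≤ 1 then []
  else
    (parts.dropLast.foldl
      (fun (st : List String × List String) part =>
        (st.1 ++ [part], st.2 ++ [PySem.Str.join "/" (st.1 ++ [part])]))
      ([], [])).2

-- ===== PORT B =====
-- Source B: full = "/".join(cleaned parts); [full[:i] for i, c in enumerate(full) if c == "/"]
def get_all_parent_paths_alt (category_path : String) : List String :=
  let parts : List String :=
    (((PySem.Str.split? category_path "/").getD []).filter
        (fun p => PySem.Str.strip p ≠ "")).map PySem.Str.strip
  let full := PySem.Str.join "/" parts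
  ((PySem.List.enumerate full.toList).filter (fun p => p.2 == '/')).map
    (fun p => PySem.Str.slice full none (some p.1))

-- ===== PRECONDITION & SPEC =====
def Spec_get_all_parent_paths (category_path : String) (out : List String) : Prop := out = get_all_parent_paths_alt category_path
instance (category_path : String) (out : List String) : Decidable (Spec_get_all_parent_paths category_path out) := by unfold Spec_get_all_parent_paths; infer_instance

-- ===== CLAIM (what is proved, stated in full; the proofs are below) =====
def Claim_equal_get_all_parent_paths : Prop := ∀ (category_path : String), Dom_get_all_parent_paths category_path → Spec_get_all_parent_paths category_path (get_all_parent_paths category_path)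

-- ===== LEMMAS AND PROOFS =====

-- common reference form: the '/'-joined proper prefixes of the parts list, shortest first
def pvStep (a b : String) : String := a ++ "/" ++ b

def pvScanForm : List String → List String
  | [] => []
  | h :: t => (List.scanl pvStep h t).dropLast

-- character-level reference: prefixes of `pre ++ cs` ending just before each '/' of cs
def pvSpc : List Char → List Char → List (List Char)
  | _, [] => []
  | pre, c :: r => (if c = '/' then [pre] else []) ++ pvSpc (pre ++ [c]) r

-- ---------- A-side: the accumulator loop equals the scanl form ----------

theorem chars_join_snoc (sep x : List Char) (l : List (List Char)) (h : l ≠ []) :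
    PySem.Chars.join sep (l ++ [x]) = PySem.Chars.join sep l ++ sep ++ x := by
  induction l with
  | nil => cases h rfl
  | cons a t ih =>
    cases t with
    | nil => simp [PySem.Chars.join_cons_cons, PySem.Chars.join_singleton]
    | cons b r =>
      have := ih (by simp)
      simp only [List.cons_append, PySem.Chars.join_cons_cons] at this ⊢
      simp [this]

theorem str_join_snoc (acc : List String) (x : String) (h : acc ≠ []) :
    PySem.Str.join "/" (acc ++ [x]) = PySem.Str.join "/" acc ++ "/" ++ x := by
  apply String.toList_inj.mp
  simp only [String.toList_append, PySem.Str.toList_join, List.map_append, List.map_cons,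
    List.map_nil]
  exact chars_join_snoc _ _ _ (by simpa using h)

theorem str_join_singleton (x : String) : PySem.Str.join "/" [x] = x := by
  apply String.toList_inj.mp
  simp [PySem.Str.toList_join, PySem.Chars.join_singleton]

theorem loop_eq_scanl_tail (l : List String) (acc ps : List String) (s : String)
    (h : acc ≠ []) (hs : PySem.Str.join "/" acc = s) :
    (l.foldl
      (fun (st : List String × List String) part =>
        (st.1 ++ [part], st.2 ++ [PySem.Str.join "/" (st.1 ++ [part])]))
      (acc, ps)).2
    = ps ++ (List.scanl pvStep s l).tail := by
  induction l generalizing acc ps s with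
  | nil => simp
  | cons x xs ih =>
    have hj : PySem.Str.join "/" (acc ++ [x]) = pvStep s x := by
      rw [str_join_snoc acc x h, hs]; rfl
    simp only [List.foldl_cons, List.scanl_cons, List.tail_cons]
    rw [ih (acc ++ [x]) (ps ++ [PySem.Str.join "/" (acc ++ [x])]) (pvStep s x)
      (by simp) hj, hj]
    cases xs with
    | nil => simp
    | cons y ys => simp [List.scanl_cons]

theorem scanl_dropLast (t : List String) (s : String) (h : t ≠ []) :
    (List.scanl pvStep s t).dropLast = List.scanl pvStep s t.dropLast := by
  induction t generalizing s with
  | nil => cases h rfl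
  | cons y ys ih =>
    cases ys with
    | nil => simp [List.scanl_cons]
    | cons z zs =>
      have := ih (pvStep s y) (by simp)
      simp only [List.scanl_cons] at this ⊢
      rw [List.dropLast_cons_of_ne_nil (by simp), this]
      simp [List.dropLast_cons_of_ne_nil]

theorem scanl_head_tail (l : List String) (s : String) :
    List.scanl pvStep s l = s :: (List.scanl pvStep s l).tail := by
  cases l <;> simp [List.scanl_cons]

theorem A_eq_scanForm (category_path : String) :
    get_all_parent_paths category_path = pvScanForm (pvParseParts category_path) := by
  unfold get_all_parent_paths
  cases hP : pvParseParts category_path with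
  | nil => simp [pvScanForm]
  | cons h t =>
    cases t with
    | nil => simp [pvScanForm]
    | cons y ys =>
      have hcond : ¬ (h :: y :: ys = [] ∨ ((h :: y :: ys).length : Int) ≤ 1) := by simp
      rw [if_neg hcond]
      have hdrop : (h :: y :: ys).dropLast = h :: (y :: ys).dropLast := by
        simp [List.dropLast_cons_of_ne_nil]
      rw [hdrop, List.foldl_cons]
      have hfirst : ((([] : List String) ++ [h],
          ([] : List String) ++ [PySem.Str.join "/" (([] : List String) ++ [h])]))
          = ([h], [h]) := by
        simp [str_join_singleton]
      rw [hfirst, loop_eq_scanl_tail _ [h] [h] h (by simp) (str_join_singleton h)]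
      show [h] ++ (List.scanl pvStep h (y :: ys).dropLast).tail
          = pvScanForm (h :: y :: ys)
      simp only [pvScanForm]
      rw [scanl_dropLast _ _ (by simp), scanl_head_tail ((y :: ys).dropLast) h]
      simp

-- ---------- segments produced by split on "/" contain no '/' ----------

theorem go_noSep (c : Char) (fuel : Nat) :
    ∀ (l cur : List Char) (acc : List (List Char)),
      l.length ≤ fuel → (∀ x ∈ acc, c ∉ x) → c ∉ cur →
      ∀ seg ∈ PySem.Chars.splitOn.go [c] fuel l cur acc, c ∉ seg := by
  induction fuel with
  | zero =>
    intro l cur acc hlen hacc hcur seg hseg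
    have hl : l = [] := List.eq_nil_of_length_eq_zero (Nat.le_zero.mp hlen)
    subst hl
    rw [show PySem.Chars.splitOn.go [c] 0 [] cur acc
        = ((cur.reverse ++ []) :: acc).reverse from rfl] at hseg
    simp only [List.mem_reverse, List.mem_cons, List.append_nil] at hseg
    rcases hseg with h | h
    · subst h; simpa using hcur
    · exact hacc _ h
  | succ fuel ih =>
    intro l cur acc hlen hacc hcur seg hseg
    cases l with
    | nil =>
      rw [show PySem.Chars.splitOn.go [c] (fuel+1) [] cur acc
          = (cur.reverse :: acc).reverse from rfl] at hseg
      simp only [List.mem_reverse, List.mem_cons] at hseg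
      rcases hseg with h | h
      · subst h; simpa using hcur
      · exact hacc _ h
    | cons d rest =>
      rw [show PySem.Chars.splitOn.go [c] (fuel+1) (d :: rest) cur acc
          = if [c].isPrefixOf (d :: rest) then
              PySem.Chars.splitOn.go [c] fuel (List.drop ([c] : List Char).length (d :: rest))
                [] (cur.reverse :: acc)
            else PySem.Chars.splitOn.go [c] fuel rest (d :: cur) acc from rfl] at hseg
      by_cases hpre : [c].isPrefixOf (d :: rest)
      · rw [if_pos hpre] at hseg
        refine ih _ _ _ (by simp at hlen ⊢; omega) ?_ (by simp) seg hseg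
        intro x hx
        rcases List.mem_cons.mp hx with h | h
        · subst h; simpa using hcur
        · exact hacc _ h
      · rw [if_neg hpre] at hseg
        have hdc : d ≠ c := by
          intro h; exact hpre (by simp [List.isPrefixOf, h])
        refine ih _ _ _ (by simp at hlen ⊢; omega) hacc ?_ seg hseg
        simp only [List.mem_cons, not_or]
        exact ⟨fun h => hdc h.symm, hcur⟩

theorem splitOn_noSep (s : List Char) (c : Char) :
    ∀ seg ∈ PySem.Chars.splitOn s [c], c ∉ seg := by
  intro seg hseg
  unfold PySem.Chars.splitOn at hseg
  exact go_noSep c (s.length + 1) s [] [] (by omega) (by simp) (by simp) seg hseg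

theorem strip_noSep (c : Char) (l : List Char) (h : c ∉ l) : c ∉ PySem.Chars.strip l := by
  intro hmem
  apply h
  unfold PySem.Chars.strip PySem.Chars.rstrip PySem.Chars.lstrip at hmem
  simp only [List.mem_reverse] at hmem
  have h1 := (List.dropWhile_sublist (l := (List.dropWhile PySem.Chars.isspace l).reverse)
    PySem.Chars.isspace).mem hmem
  simp only [List.mem_reverse] at h1
  exact (List.dropWhile_sublist (l := l) PySem.Chars.isspace).mem h1

theorem parts_noSlash (category_path : String) :
    ∀ p ∈ (((PySem.Str.split? category_path "/").getD []).filter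
        (fun p => PySem.Str.strip p ≠ "")).map PySem.Str.strip,
      '/' ∉ p.toList := by
  intro p hp
  rcases List.mem_map.mp hp with ⟨q, hq, rfl⟩
  have hq' := (List.mem_filter.mp hq).1
  rw [PySem.Str.toList_strip]
  apply strip_noSep
  have hs2 : PySem.Str.split? category_path "/"
      = some ((PySem.Chars.splitOn category_path.toList ['/']).map String.ofList) := by
    unfold PySem.Str.split? PySem.Chars.split?
    norm_num [show ("/" : String).toList = ['/'] from rfl]
  rw [hs2] at hq'
  simp only [Option.getD_some, List.mem_map] at hq'
  rcases hq' with ⟨seg, hseg, rfl⟩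
  rw [String.toList_ofList]
  exact splitOn_noSep _ _ seg hseg

-- ---------- B-side: enumerate/filter/slice equals pvSpc, pvSpc equals the scanl form ----------

theorem enum_filter_slice (full : String) :
    ∀ (cs pre : List Char), full.toList = pre ++ cs →
      ((PySem.List.enumerate cs ((pre.length : Nat) : Int)).filter
          (fun p => p.2 == '/')).map (fun p => PySem.Str.slice full none (some p.1))
      = (pvSpc pre cs).map String.ofList := by
  intro cs
  induction cs with
  | nil => intro pre _; simp [pvSpc, PySem.List.enumerate]
  | cons c r ih =>
    intro pre hfull
    have hstep : ((pre.length : Nat) : Int) + 1 = (((pre ++ [c]).length : Nat) : Int) := by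
      simp
    rw [PySem.List.enumerate_cons, hstep]
    have hr : full.toList = (pre ++ [c]) ++ r := by simpa [List.append_assoc] using hfull
    by_cases hc : c = '/'
    · subst hc
      have hsl : PySem.Str.slice full none (some ((pre.length : Nat) : Int))
          = String.ofList pre := by
        apply String.toList_inj.mp
        rw [PySem.Str.toList_slice, PySem.Chars.slice_eq_listSlice,
          PySem.List.slice_to_natCast, hfull, String.toList_ofList]
        simp
      rw [List.filter_cons_of_pos (by simp), List.map_cons, hsl,
        ih (pre ++ ['/']) hr]
      simp [pvSpc]
    · have hbeq : (c == '/') = false := by simp [hc]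
      simp only [List.filter_cons, hbeq, pvSpc, if_neg hc]
      simpa using ih (pre ++ [c]) hr

theorem pvSpc_shift (a : List Char) :
    ∀ (cs b : List Char), pvSpc (a ++ b) cs = (pvSpc b cs).map (a ++ ·) := by
  intro cs
  induction cs with
  | nil => intro b; simp [pvSpc]
  | cons c r ih =>
    intro b
    by_cases hc : c = '/'
    · subst hc
      simp [pvSpc, List.append_assoc, ih (b ++ ['/'])]
    · simp [pvSpc, hc, List.append_assoc, ih (b ++ [c])]

theorem pvSpc_nil_of_noSlash (cs : List Char) (h : '/' ∉ cs) :
    ∀ pre, pvSpc pre cs = [] := by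
  induction cs with
  | nil => intro pre; rfl
  | cons c r ih =>
    intro pre
    simp only [List.mem_cons, not_or] at h
    have hcne : ¬ c = '/' := fun hh => h.1 hh.symm
    simp [pvSpc, hcne, ih h.2]

theorem pvSpc_append_sep (x : List Char) (hx : '/' ∉ x) :
    ∀ (pre r : List Char),
      pvSpc pre (x ++ '/' :: r) = (pre ++ x) :: pvSpc (pre ++ x ++ ['/']) r := by
  induction x with
  | nil => intro pre r; simp [pvSpc]
  | cons c cs ih =>
    intro pre r
    simp only [List.mem_cons, not_or] at hx
    have := ih hx.2 (pre ++ [c]) r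
    simp only [List.cons_append, pvSpc,
      if_neg (show ¬ c = '/' from fun hh => hx.1 hh.symm)]
    simpa [List.append_assoc] using this

theorem scanl_map_pre (p : String) :
    ∀ (l : List String) (a : String),
      List.scanl pvStep (p ++ a) l = (List.scanl pvStep a l).map (p ++ ·) := by
  intro l
  induction l with
  | nil => intro a; simp
  | cons b bs ih =>
    intro a
    have hstep : pvStep (p ++ a) b = p ++ pvStep a b := by
      unfold pvStep; simp [String.append_assoc]
    simp only [List.scanl_cons, hstep, ih (pvStep a b), List.map_cons]

theorem scanl_ne_nil (a : String) (l : List String) : List.scanl pvStep a l ≠ [] := by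
  cases l <;> simp [List.scanl_cons]

theorem spc_join_eq_scanForm :
    ∀ (t : List String) (x : String), '/' ∉ x.toList → (∀ p ∈ t, '/' ∉ p.toList) →
      pvSpc [] (PySem.Chars.join ['/'] ((x :: t).map String.toList))
      = (pvScanForm (x :: t)).map String.toList := by
  intro t
  induction t with
  | nil =>
    intro x hx _
    simp only [List.map_cons, List.map_nil, PySem.Chars.join_singleton]
    rw [pvSpc_nil_of_noSlash x.toList hx []]
    simp [pvScanForm]
  | cons y ys ih =>
    intro x hx hall
    have hy : '/' ∉ y.toList := hall y (by simp)
    have hys : ∀ p ∈ ys, '/' ∉ p.toList := fun p hp => hall p (by simp [hp])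
    have hjoin : PySem.Chars.join ['/'] ((x :: y :: ys).map String.toList)
        = x.toList ++ '/' :: PySem.Chars.join ['/'] ((y :: ys).map String.toList) := by
      simp [PySem.Chars.join_cons_cons, List.append_assoc]
    rw [hjoin, pvSpc_append_sep x.toList hx [] _]
    have hshift := pvSpc_shift (x.toList ++ ['/'])
      (PySem.Chars.join ['/'] ((y :: ys).map String.toList)) []
    simp only [List.append_nil, List.nil_append] at hshift ⊢
    rw [hshift, ih y hy hys]
    -- RHS side
    simp only [pvScanForm]
    rw [List.scanl_cons, List.dropLast_cons_of_ne_nil (scanl_ne_nil _ _)]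
    have hsc : List.scanl pvStep (pvStep x y) ys
        = (List.scanl pvStep y ys).map ((x ++ "/") ++ ·) := by
      have : pvStep x y = (x ++ "/") ++ y := by unfold pvStep; rw [String.append_assoc]
      rw [this, scanl_map_pre]
    rw [hsc, ← List.map_dropLast, List.map_cons, List.map_map, List.map_map]
    congr 1
    apply List.map_congr_left
    intro s _
    simp [Function.comp, String.toList_append]

theorem B_eq_scanForm (category_path : String) :
    get_all_parent_paths_alt category_path = pvScanForm (pvParseParts category_path) := by
  by_cases h0 : category_path = ""
  · subst h0; decide
  · unfold get_all_parent_paths_alt pvParseParts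
    rw [if_neg h0]
    set P := (((PySem.Str.split? category_path "/").getD []).filter
        (fun p => PySem.Str.strip p ≠ "")).map PySem.Str.strip with hP
    have hfull : (PySem.Str.join "/" P).toList
        = PySem.Chars.join ['/'] (P.map String.toList) := by
      rw [PySem.Str.toList_join]; rfl
    have henum := enum_filter_slice (PySem.Str.join "/" P)
      (PySem.Chars.join ['/'] (P.map String.toList)) [] (by simpa using hfull)
    simp only [List.length_nil, Nat.cast_zero] at henum
    show ((PySem.List.enumerate (PySem.Str.join "/" P).toList 0).filter
          (fun p => p.2 == '/')).map (fun p => PySem.Str.slice (PySem.Str.join "/" P) none (some p.1))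
        = pvScanForm P
    rw [hfull, henum]
    cases hPc : P with
    | nil => rfl
    | cons x t =>
      have hns := parts_noSlash category_path
      rw [← hP, hPc] at hns
      rw [spc_join_eq_scanForm t x (hns x (by simp)) (fun p hp => hns p (by simp [hp]))]
      rw [List.map_map,
        show (String.ofList ∘ String.toList) = id from funext (fun s => String.ofList_toList),
        List.map_id]

-- ===== VERDICT (by name: the statement is the Claim_ definition above) =====
theorem get_all_parent_paths_spec : Claim_equal_get_all_parent_paths := by
  intro category_path _
  unfold Spec_get_all_parent_paths
  rw [A_eq_scanForm, B_eq_scanForm]
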